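-- pv_equiv track=rewrite | github.com/trevorhitchcock/Regular-Polygons | compass_regular_polygons.py | findValidPolygons
-- ===== SOURCE A (Python) =====
-- def prime_factors(n):
--     i = 2
--     factors = []
--     while i * i <= n:
--         if n % i:
--             i += 1
--         else:
--             n //= i
--             factors.append(i)
--     if n > 1:
--         factors.append(n)
--     return factors
--
-- def findValidPolygons(max_sides):
--
--     # valid fermat primes
--     valid_factors = [2,3,5,17,257,65537]
--
--     # empty initial list of valid polygons
--     valid_polygons = []
--
--     # start at 3, triangle first valid polygon
--     for i in range(3,max_sides):
--         primefactors = prime_factors(i)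
--
--         valid_set = True
--         # for each prime in list of prime factors
--         for prime in primefactors:
--             # prime is not a fermat prime
--             if prime not in valid_factors:
--                 valid_set = False
--                 break
--
--         # remove 2s from primefactors
--         # still works for 2*2*2... because [] == [] and valid_set == True
--         no_twos_primefactors = [x for x in primefactors if x != 2]
--
--         # if primefactors is equal to the primefactors without duplicates
--         if(valid_set and no_twos_primefactors == sorted(list(set(no_twos_primefactors)))):
--             # then it is a valid polygon
--             valid_polygons.append(i)
--
--     return valid_polygons
-- ===== SOURCE B (Python) =====
-- def findValidPolygons(max_sides):
--     # Directly enumerate 2^k * (product of a distinct subset of Fermat primes)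
--     fermat_primes = [3, 5, 17, 257, 65537]
--     odd_parts = [1]
--     for p in fermat_primes:
--         odd_parts = odd_parts + [q * p for q in odd_parts]
--     valid = set()
--     for q in odd_parts:
--         m = q
--         while m < max_sides:
--             if m >= 3:
--                 valid.add(m)
--             m *= 2
--     return sorted(valid)
-- ===== Notes on version B (the rewrite author's own statement) =====
-- stated objective: faster
-- what changed: Instead of trial-factoring every candidate up to max_sides and inspecting its prime-factor list, B directly generates every constructible side count as a power of two times a product of a distinct subset of the Fermat primes and returns them sorted.
import Mathlib
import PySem

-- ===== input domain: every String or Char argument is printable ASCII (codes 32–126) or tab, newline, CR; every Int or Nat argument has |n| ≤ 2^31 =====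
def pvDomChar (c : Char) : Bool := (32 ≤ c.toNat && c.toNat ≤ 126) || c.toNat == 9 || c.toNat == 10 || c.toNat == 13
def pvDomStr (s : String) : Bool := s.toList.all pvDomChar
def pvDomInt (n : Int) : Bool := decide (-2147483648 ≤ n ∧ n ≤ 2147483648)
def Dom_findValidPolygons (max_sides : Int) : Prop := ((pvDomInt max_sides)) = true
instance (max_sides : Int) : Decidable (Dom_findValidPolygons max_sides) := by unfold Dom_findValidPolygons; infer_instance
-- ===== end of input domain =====

-- B replaces A's per-candidate trial-division test with a direct enumeration of the
-- constructible side counts (2^k times a product of distinct Fermat primes), then sorts; faster.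

-- ===== PORT A =====
-- the while-loop of prime_factors, ported with a fuel argument; the fuel 2*n.toNat+2 passed
-- by prime_factors exceeds the iteration count (proved by pfLoop_mono below), and the
-- fuel-exhaustion branch returns the same post-loop value as a false guard.
def pfLoop : Nat → Int → Int → List Int → List Int
  | 0, n, _, factors => if n > 1 then factors ++ [n] else factors
  | fuel+1, n, i, factors =>
    if i * i ≤ n then
      if PySem.Int.mod n i ≠ 0 then pfLoop fuel n (i + 1) factors
      else pfLoop fuel (PySem.Int.floordiv n i) i (factors ++ [i])
    else if n > 1 then factors ++ [n] else factors

def prime_factors (n : Int) : List Int := pfLoop (2 * n.toNat + 2) n 2 []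

def valid_factors : List Int := [2, 3, 5, 17, 257, 65537]

-- the 'for prime in primefactors: … break' loop of A
def validSetLoop : List Int → Bool
  | [] => true
  | p :: rest => if valid_factors.contains p then validSetLoop rest else false

-- the body of A's main loop: is i appended to valid_polygons?
def polyCheck (i : Int) : Bool :=
  let primefactors := prime_factors i
  let valid_set := validSetLoop primefactors
  let no_twos := primefactors.filter (fun x => x != 2)
  valid_set && (no_twos == PySem.List.sorted (PySem.Set.ofList no_twos) (fun x => x) false)

def findValidPolygons (max_sides : Int) : List Int :=
  (PySem.List.pyRange 3 max_sides 1).foldl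
    (fun valid_polygons i => if polyCheck i then valid_polygons ++ [i] else valid_polygons) []

-- ===== PORT B =====
def fermatPrimes : List Int := [3, 5, 17, 257, 65537]

def oddParts : List Int := fermatPrimes.foldl (fun ops p => ops ++ ops.map (fun q => q * p)) [1]

-- the 'while m < max_sides: … m *= 2' loop of B; the extra '1 ≤ m' in the guard is only a
-- termination guard: every q fed in from oddParts is ≥ 1 and m only doubles, so it never fires.
def powLoop (max_sides m : Int) (valid : PySem.Set Int) : PySem.Set Int :=
  if h : 1 ≤ m ∧ m < max_sides then
    powLoop max_sides (m * 2) (if 3 ≤ m then PySem.Set.add valid m else valid)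
  else valid
termination_by (max_sides - m).toNat
decreasing_by omega

def findValidPolygons_alt (max_sides : Int) : List Int :=
  let valid := oddParts.foldl (fun v q => powLoop max_sides q v) PySem.Set.empty
  PySem.List.sorted valid (fun x => x) false

-- ===== PRECONDITION & SPEC =====
def Spec_findValidPolygons (max_sides : Int) (out : List Int) : Prop := out = findValidPolygons_alt max_sides
instance (max_sides : Int) (out : List Int) : Decidable (Spec_findValidPolygons max_sides out) := by unfold Spec_findValidPolygons; infer_instance

-- ===== CLAIM (what is proved, stated in full; the proofs are below) =====
def Claim_equal_findValidPolygons : Prop := ∀ (max_sides : Int), Dom_findValidPolygons max_sides → Spec_findValidPolygons max_sides (findValidPolygons max_sides)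

-- ===== LEMMAS AND PROOFS =====

lemma guard_false_of_fuel {n i : Int} (h2 : 2 ≤ i) (hf : 2 * n.toNat + 2 ≤ i.toNat) :
    ¬ (i * i ≤ n) := by
  intro hle
  have h1 : 2 * i ≤ i * i := by nlinarith
  omega

-- fuel irrelevance: any fuel f with 2*n.toNat + 2 ≤ f + i.toNat gives the loop's true value
lemma pfLoop_mono : ∀ (f g : Nat) (n i : Int) (acc : List Int), 2 ≤ i →
    2 * n.toNat + 2 ≤ f + i.toNat → f ≤ g → pfLoop f n i acc = pfLoop g n i acc := by
  intro f
  induction f with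
  | zero =>
    intro g n i acc h2 hf _
    have hg : ¬ (i * i ≤ n) := guard_false_of_fuel h2 (by omega)
    cases g with
    | zero => rfl
    | succ g' => simp [pfLoop, hg]
  | succ f ih =>
    intro g n i acc h2 hf hfg
    cases g with
    | zero => omega
    | succ g' =>
      by_cases hg : i * i ≤ n
      · have hi_le_n : i ≤ n := le_trans (by nlinarith) hg
        by_cases hm : PySem.Int.mod n i ≠ 0
        · simp only [pfLoop, if_pos hg, if_pos hm]
          exact ih g' n (i+1) acc (by omega) (by omega) (by omega)
        · simp only [pfLoop, if_pos hg, if_neg hm]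
          have hipos : (0:Int) < i := by omega
          have hdiv : PySem.Int.floordiv n i = n / i := PySem.Int.floordiv_eq_ediv_of_pos hipos
          have hlt : n / i < n := Int.ediv_lt_of_lt_mul (by omega) (by nlinarith)
          have hge : 0 ≤ n / i := Int.ediv_nonneg (by omega) (by omega)
          rw [hdiv]
          exact ih g' (n / i) i (acc ++ [i]) h2 (by omega) (by omega)
      · simp [pfLoop, hg]

lemma pfLoop_acc : ∀ (f : Nat) (n i : Int) (acc : List Int),
    pfLoop f n i acc = acc ++ pfLoop f n i [] := by
  intro f
  induction f with
  | zero => intro n i acc; by_cases h : n > 1 <;> simp [pfLoop, h]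
  | succ f ih =>
    intro n i acc
    by_cases hg : i * i ≤ n
    · by_cases hm : PySem.Int.mod n i ≠ 0
      · simp only [pfLoop, if_pos hg, if_pos hm]; exact ih n (i+1) acc
      · simp only [pfLoop, if_pos hg, if_neg hm]
        rw [ih _ _ (acc ++ [i]), ih _ _ ([] ++ [i])]
        simp
    · by_cases h : n > 1 <;> simp [pfLoop, hg, h]

lemma pfLoop_succ (f : Nat) (n i : Int) (acc : List Int) :
    pfLoop (f+1) n i acc = if i * i ≤ n then
      (if PySem.Int.mod n i ≠ 0 then pfLoop f n (i + 1) acc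
       else pfLoop f (PySem.Int.floordiv n i) i (acc ++ [i]))
    else if n > 1 then acc ++ [n] else acc := rfl

lemma prime_factors_two_mul (m : Int) (hm : 1 ≤ m) :
    prime_factors (2 * m) = 2 :: prime_factors m := by
  rcases eq_or_lt_of_le hm with h1 | h2
  · rw [← h1]; decide
  · have hm2 : 2 ≤ m := h2
    have hg : (2:Int) * 2 ≤ 2 * m := by omega
    have hmod : PySem.Int.mod (2*m) 2 = 0 := by
      rw [PySem.Int.mod_eq_zero_iff_dvd]; exact ⟨m, rfl⟩
    have hdiv : PySem.Int.floordiv (2*m) 2 = m := by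
      rw [PySem.Int.floordiv_eq_ediv_of_pos (by omega)]
      omega
    have hfuel : 2 * (2*m).toNat + 2 = (4 * m.toNat + 1) + 1 := by omega
    rw [prime_factors, hfuel]
    rw [pfLoop_succ, if_pos hg, if_neg (by simp), hdiv]
    rw [pfLoop_acc]
    rw [show pfLoop (4 * m.toNat + 1) m 2 [] = prime_factors m from
      (pfLoop_mono (2 * m.toNat + 2) (4 * m.toNat + 1) m 2 [] (by omega) (by omega) (by omega)).symm]
    rfl

lemma pfLoop_prod : ∀ (f : Nat) (n i : Int) (acc : List Int), 2 ≤ i → 1 ≤ n →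
    2 * n.toNat + 2 ≤ f + i.toNat → (pfLoop f n i acc).prod = acc.prod * n := by
  intro f
  induction f with
  | zero =>
    intro n i acc h2 hn hf
    by_cases h : n > 1
    · simp [pfLoop, h, List.prod_append]
    · have hn1 : n = 1 := by omega
      subst hn1; simp [pfLoop]
  | succ f ih =>
    intro n i acc h2 hn hf
    by_cases hg : i * i ≤ n
    · have hi_le_n : i ≤ n := le_trans (by nlinarith) hg
      by_cases hm : PySem.Int.mod n i ≠ 0
      · rw [pfLoop_succ, if_pos hg, if_pos hm]
        exact ih n (i+1) acc (by omega) hn (by omega)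
      · rw [pfLoop_succ, if_pos hg, if_neg hm]
        have hipos : (0:Int) < i := by omega
        have hdvd : i ∣ n := by
          rw [← PySem.Int.mod_eq_zero_iff_dvd]; simpa using hm
        rw [PySem.Int.floordiv_eq_ediv_of_pos hipos]
        have hlt : n / i < n := Int.ediv_lt_of_lt_mul (by omega) (by nlinarith)
        have hge : 1 ≤ n / i := by
          rw [Int.le_ediv_iff_mul_le hipos]; omega
        rw [ih (n / i) i (acc ++ [i]) h2 hge (by omega)]
        have : i * (n / i) = n := Int.mul_ediv_cancel' hdvd
        simp [List.prod_append]
        rw [mul_assoc, this]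
    · rw [pfLoop_succ, if_neg hg]
      by_cases h : n > 1
      · simp [h, List.prod_append]
      · have hn1 : n = 1 := by omega
        subst hn1; simp

lemma prime_factors_prod (n : Int) (hn : 1 ≤ n) : (prime_factors n).prod = n := by
  rw [prime_factors, pfLoop_prod _ _ _ _ (by omega) hn (by omega)]
  simp

lemma validSetLoop_eq_all (l : List Int) : validSetLoop l = l.all (valid_factors.contains ·) := by
  induction l with
  | nil => rfl
  | cons p rest ih =>
    by_cases h : valid_factors.contains p <;> simp [validSetLoop, ih]

lemma polyCheck_two_mul (m : Int) (hm : 1 ≤ m) : polyCheck (2 * m) = polyCheck m := by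
  unfold polyCheck
  rw [prime_factors_two_mul m hm]
  simp [validSetLoop, valid_factors]

lemma prod_eq_pow_count_two (L : List Int) :
    L.prod = 2 ^ (L.count 2) * (L.filter (fun x => x != 2)).prod := by
  induction L with
  | nil => simp
  | cons x rest ih =>
    by_cases h : x = 2
    · subst h; simp [ih]; ring
    · have : (x != 2) = true := by simpa using h
      simp [h, this, ih]; ring

lemma sublist_of_pairwise_lt : ∀ (M l : List Int), l.Pairwise (· < ·) →
    M.Pairwise (· < ·) → (∀ x ∈ l, x ∈ M) → l.Sublist M := by
  intro M
  induction M with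
  | nil =>
    intro l _ _ hsub
    cases l with
    | nil => exact List.Sublist.refl _
    | cons x t => exact absurd (hsub x (by simp)) (by simp)
  | cons y M ih =>
    intro l hl hM hsub
    cases l with
    | nil => exact List.nil_sublist _
    | cons x t =>
      have hxmem : x = y ∨ x ∈ M := List.mem_cons.1 (hsub x (by simp))
      by_cases hxy : x = y
      · subst hxy
        apply List.Sublist.cons₂
        apply ih t (hl.sublist (List.sublist_cons_self _ _)) (hM.sublist (List.sublist_cons_self _ _))
        intro z hz
        have hxz : x < z := (List.pairwise_cons.1 hl).1 z hz
        have : z = x ∨ z ∈ M := List.mem_cons.1 (hsub z (by simp [hz]))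
        rcases this with h | h
        · omega
        · exact h
      · have hxM : x ∈ M := by tauto
        have hyx : y < x := (List.pairwise_cons.1 hM).1 x hxM
        apply List.Sublist.cons
        apply ih (x :: t) hl (hM.sublist (List.sublist_cons_self _ _))
        intro z hz
        have hz' : z = x ∨ z ∈ t := List.mem_cons.1 hz
        have : z = y ∨ z ∈ M := List.mem_cons.1 (hsub z hz)
        rcases this with h | h
        · exfalso
          rcases hz' with rfl | hzt
          · omega
          · have : x < z := (List.pairwise_cons.1 hl).1 z hzt; omega
        · exact h

set_option maxRecDepth 100000 in
lemma oddParts_polyCheck : oddParts.all (fun q => polyCheck q && decide (1 ≤ q)) = true := by decide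

lemma oddParts_sublists : fermatPrimes.sublists.all (fun l => oddParts.contains l.prod) = true := by decide

-- A's per-candidate test accepts i exactly when i is 2^a times a product of distinct Fermat primes
lemma polyCheck_iff (i : Int) (hi : 1 ≤ i) :
    polyCheck i = true ↔ ∃ q ∈ oddParts, ∃ a : Nat, i = q * 2 ^ a := by
  constructor
  · intro hpc
    have hprod := prime_factors_prod i hi
    set L := prime_factors i with hL
    unfold polyCheck at hpc
    rw [← hL] at hpc
    simp only [Bool.and_eq_true, beq_iff_eq] at hpc
    obtain ⟨hvs, hsorted⟩ := hpc
    set nt := L.filter (fun x => x != 2) with hnt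
    have hall : ∀ p ∈ L, p ∈ valid_factors := by
      rw [validSetLoop_eq_all] at hvs
      simp only [List.all_eq_true] at hvs
      intro p hp
      simpa using hvs p hp
    have hpw : nt.Pairwise (· < ·) := by
      rw [hsorted]; exact PySem.List.sorted_ofList_pairwise_lt nt
    have hntmem : ∀ x ∈ nt, x ∈ fermatPrimes := by
      intro x hx
      rw [hnt, List.mem_filter] at hx
      have h1 := hall x hx.1
      have h2 : x ≠ 2 := by simpa using hx.2
      simp only [valid_factors, List.mem_cons, List.not_mem_nil, or_false] at h1
      simp only [fermatPrimes, List.mem_cons, List.not_mem_nil, or_false]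
      tauto
    have hsub : nt.Sublist fermatPrimes :=
      sublist_of_pairwise_lt fermatPrimes nt hpw (by decide) hntmem
    have hq : nt.prod ∈ oddParts := by
      have := List.all_eq_true.1 oddParts_sublists nt (List.mem_sublists.2 hsub)
      simpa using this
    refine ⟨nt.prod, hq, L.count 2, ?_⟩
    rw [← hprod, prod_eq_pow_count_two L, ← hnt]
    ring
  · rintro ⟨q, hq, a, rfl⟩
    have hq' := List.all_eq_true.1 oddParts_polyCheck q hq
    simp only [Bool.and_eq_true, decide_eq_true_eq] at hq'
    obtain ⟨hpcq, hq1⟩ := hq'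
    clear hi
    induction a with
    | zero => simpa using hpcq
    | succ a iha =>
      have h2a : (1:Int) ≤ 2 ^ a := one_le_pow₀ (by norm_num)
      have h1 : (1:Int) ≤ q * 2 ^ a := by nlinarith
      have h2 : q * 2 ^ (a + 1) = 2 * (q * 2 ^ a) := by ring
      rw [h2, polyCheck_two_mul _ h1]
      exact iha

lemma powLoop_mem (max_sides : Int) : ∀ (k : Nat) (m : Int) (acc : PySem.Set Int) (x : Int),
    (max_sides - m).toNat ≤ k → 1 ≤ m →
    (x ∈ powLoop max_sides m acc ↔ x ∈ acc ∨ ∃ a : Nat, x = m * 2 ^ a ∧ 3 ≤ x ∧ x < max_sides) := by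
  intro k
  induction k with
  | zero =>
    intro m acc x hk hm
    have hge : max_sides ≤ m := by omega
    rw [powLoop, dif_neg (by omega)]
    constructor
    · exact Or.inl
    · rintro (h | ⟨a, rfl, h3, hlt⟩)
      · exact h
      · exfalso
        have h2a : (1:Int) ≤ 2 ^ a := one_le_pow₀ (by norm_num)
        nlinarith
  | succ k ih =>
    intro m acc x hk hm
    by_cases hg : m < max_sides
    · rw [powLoop, dif_pos ⟨hm, hg⟩]
      rw [ih (m * 2) _ x (by omega) (by omega)]
      have hacc : (x ∈ (if 3 ≤ m then PySem.Set.add acc m else acc)) ↔ x ∈ acc ∨ (x = m ∧ 3 ≤ m) := by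
        split_ifs with h3
        · rw [PySem.Set.mem_add]; tauto
        · tauto
      rw [hacc]
      constructor
      · rintro ((h | ⟨rfl, h3⟩) | ⟨a, rfl, h3, hlt⟩)
        · exact Or.inl h
        · exact Or.inr ⟨0, by simp, h3, hg⟩
        · exact Or.inr ⟨a + 1, by ring, h3, hlt⟩
      · rintro (h | ⟨a, rfl, h3, hlt⟩)
        · exact Or.inl (Or.inl h)
        · cases a with
          | zero => exact Or.inl (Or.inr ⟨by simp, by simpa using h3⟩)
          | succ a => exact Or.inr ⟨a, by ring, h3, hlt⟩
    · rw [powLoop, dif_neg (by omega)]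
      constructor
      · exact Or.inl
      · rintro (h | ⟨a, rfl, h3, hlt⟩)
        · exact h
        · exfalso
          have h2a : (1:Int) ≤ 2 ^ a := one_le_pow₀ (by norm_num)
          nlinarith

lemma powLoop_nodup (max_sides : Int) : ∀ (k : Nat) (m : Int) (acc : PySem.Set Int),
    (max_sides - m).toNat ≤ k → 1 ≤ m → acc.Nodup → (powLoop max_sides m acc).Nodup := by
  intro k
  induction k with
  | zero =>
    intro m acc hk hm hn
    rw [powLoop, dif_neg (by omega)]; exact hn
  | succ k ih =>
    intro m acc hk hm hn
    by_cases hg : m < max_sides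
    · rw [powLoop, dif_pos ⟨hm, hg⟩]
      apply ih (m * 2) _ (by omega) (by omega)
      split_ifs with h3
      · exact PySem.Set.nodup_add _ _ hn
      · exact hn
    · rw [powLoop, dif_neg (by omega)]; exact hn

lemma foldl_powLoop_mem (max_sides : Int) : ∀ (l : List Int) (acc : PySem.Set Int) (x : Int),
    (∀ q ∈ l, 1 ≤ q) →
    (x ∈ l.foldl (fun v q => powLoop max_sides q v) acc ↔
      x ∈ acc ∨ ∃ q ∈ l, ∃ a : Nat, x = q * 2 ^ a ∧ 3 ≤ x ∧ x < max_sides) := by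
  intro l
  induction l with
  | nil => intro acc x _; simp
  | cons q l ih =>
    intro acc x hpos
    simp only [List.foldl_cons]
    rw [ih _ x (fun r hr => hpos r (by simp [hr]))]
    rw [powLoop_mem max_sides ((max_sides - q).toNat) q acc x (le_refl _) (hpos q (by simp))]
    constructor
    · rintro ((h | ⟨a, h⟩) | ⟨r, hr, a, h⟩)
      · exact Or.inl h
      · exact Or.inr ⟨q, by simp, a, h⟩
      · exact Or.inr ⟨r, by simp [hr], a, h⟩
    · rintro (h | ⟨r, hr, a, h⟩)
      · exact Or.inl (Or.inl h)
      · rcases List.mem_cons.1 hr with rfl | hrl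
        · exact Or.inl (Or.inr ⟨a, h⟩)
        · exact Or.inr ⟨r, hrl, a, h⟩

lemma foldl_powLoop_nodup (max_sides : Int) : ∀ (l : List Int) (acc : PySem.Set Int),
    (∀ q ∈ l, 1 ≤ q) → acc.Nodup → (l.foldl (fun v q => powLoop max_sides q v) acc).Nodup := by
  intro l
  induction l with
  | nil => intro acc _ hn; exact hn
  | cons q l ih =>
    intro acc hpos hn
    simp only [List.foldl_cons]
    exact ih _ (fun r hr => hpos r (by simp [hr]))
      (powLoop_nodup max_sides ((max_sides - q).toNat) q acc (le_refl _) (hpos q (by simp)) hn)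

-- ===== VERDICT (by name: the statement is the Claim_ definition above) =====
theorem findValidPolygons_spec : Claim_equal_findValidPolygons := by
  intro max_sides _
  unfold Spec_findValidPolygons
  have hq1 : ∀ q ∈ oddParts, 1 ≤ q := by
    intro q hq
    have := List.all_eq_true.1 oddParts_polyCheck q hq
    simp only [Bool.and_eq_true, decide_eq_true_eq] at this
    exact this.2
  have hA : findValidPolygons max_sides = (PySem.List.pyRange 3 max_sides 1).filter polyCheck := by
    unfold findValidPolygons
    rw [PySem.List.foldl_append_if_eq_filter]
    simp
  set ys := (PySem.List.pyRange 3 max_sides 1).filter polyCheck with hys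
  set valid := oddParts.foldl (fun v q => powLoop max_sides q v) PySem.Set.empty with hvalid
  have hnd_valid : valid.Nodup :=
    foldl_powLoop_nodup max_sides oddParts _ hq1 List.nodup_nil
  have hmem : ∀ x, x ∈ ys ↔ x ∈ valid := by
    intro x
    rw [hys, List.mem_filter, PySem.List.mem_pyRange_one,
        hvalid, foldl_powLoop_mem max_sides oddParts _ x hq1]
    constructor
    · rintro ⟨⟨h3, hlt⟩, hpc⟩
      obtain ⟨q, hq, a, hxa⟩ := (polyCheck_iff x (by omega)).1 hpc
      exact Or.inr ⟨q, hq, a, hxa, h3, hlt⟩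
    · rintro (h | ⟨q, hq, a, hxa, h3, hlt⟩)
      · exact absurd h (List.not_mem_nil)
      · exact ⟨⟨h3, hlt⟩, (polyCheck_iff x (by omega)).2 ⟨q, hq, a, hxa⟩⟩
  have hnd_ys : ys.Nodup := (PySem.List.nodup_pyRange_one 3 max_sides).filter _
  have hpw_ys : ys.Pairwise (· < ·) := (PySem.List.pairwise_lt_pyRange_one 3 max_sides).filter _
  have hperm : ys.Perm valid := (List.perm_ext_iff_of_nodup hnd_ys hnd_valid).2 hmem
  rw [hA]
  unfold findValidPolygons_alt
  exact (PySem.List.sorted_eq_of_perm_of_pairwise_lt valid ys (fun x => x) hperm hpw_ys).symm
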